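-- pv_equiv track=rewrite | github.com/gustavomarquezinho/python-edital-tjes | edital-tjes/scripts/price_register/outputs.py | get_monetary_value
-- ===== SOURCE A (Python) =====
-- def get_monetary_value(string: str):
--     cedules, cents, found_cents = '0', '0', False
--
--     for char in string:
--         if char == ',':
--             found_cents = True
--
--         if char.isdigit():
--             if found_cents:
--                 cents += char
--                 continue
--
--             cedules += char
--
--     cedules, cents = int(cedules), int(cents)
--     return cedules, cents
-- ===== SOURCE B (Python) =====
-- def get_monetary_value(string: str):
--     parts = string.split(',', 1)
--     tail = parts[1] if len(parts) > 1 else ''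
--     cedules = int('0' + ''.join(c for c in parts[0] if c.isdigit()))
--     cents = int('0' + ''.join(c for c in tail if c.isdigit()))
--     return cedules, cents
-- ===== Notes on version B (the rewrite author's own statement) =====
-- stated objective: simpler
-- what changed: Replaces the single stateful character loop with a found_cents flag by a split at the first comma followed by two independent digit-filtering passes.
import Mathlib
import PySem

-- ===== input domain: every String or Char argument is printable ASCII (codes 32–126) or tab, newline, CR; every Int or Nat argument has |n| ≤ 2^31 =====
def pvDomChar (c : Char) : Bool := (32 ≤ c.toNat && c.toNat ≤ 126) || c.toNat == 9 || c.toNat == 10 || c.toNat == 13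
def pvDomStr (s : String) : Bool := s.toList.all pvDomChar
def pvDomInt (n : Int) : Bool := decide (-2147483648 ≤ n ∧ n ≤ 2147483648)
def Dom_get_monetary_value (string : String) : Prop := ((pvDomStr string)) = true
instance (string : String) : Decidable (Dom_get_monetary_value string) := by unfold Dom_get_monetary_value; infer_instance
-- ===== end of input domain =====

-- B replaces A's single stateful loop with a found_cents flag by a split at the first
-- comma and two independent digit-filtering passes (objective: simpler).

-- ===== PORT A =====
-- the loop body of A: state is (cedules, cents, found_cents), the strings kept as List Char
def pvStepA (s : List Char × List Char × Bool) (char : Char) : List Char × List Char × Bool :=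
  let found := if char = ',' then true else s.2.2
  if PySem.Chars.isdigit char then
    if found then (s.1, s.2.1 ++ [char], found)
    else (s.1 ++ [char], s.2.1, found)
  else (s.1, s.2.1, found)

def get_monetary_value (string : String) : Int × Int :=
  let st := string.toList.foldl pvStepA (['0'], ['0'], false)
  -- int(cedules) / int(cents): the accumulator is always '0' followed by digits, so
  -- Python's int() never raises; .getD 0 is exact (the none case is unreachable)
  ((PySem.Int.ofChars? st.1).getD 0, (PySem.Int.ofChars? st.2.1).getD 0)

-- ===== PORT B =====
def get_monetary_value_alt (string : String) : Int × Int :=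
  let parts := (PySem.Str.splitMax? string "," 1).getD []
  let tail := if parts.length > 1 then parts[1]?.getD "" else ""
  let cedules := (PySem.Int.ofChars? ('0' :: (parts[0]?.getD "").toList.filter PySem.Chars.isdigit)).getD 0
  let cents := (PySem.Int.ofChars? ('0' :: tail.toList.filter PySem.Chars.isdigit)).getD 0
  (cedules, cents)

-- ===== PRECONDITION & SPEC =====
def Spec_get_monetary_value (string : String) (out : Int × Int) : Prop := out = get_monetary_value_alt string
instance (string : String) (out : Int × Int) : Decidable (Spec_get_monetary_value string out) := by unfold Spec_get_monetary_value; infer_instance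

-- ===== CLAIM (what is proved, stated in full; the proofs are below) =====
def Claim_equal_get_monetary_value : Prop := ∀ (string : String), Dom_get_monetary_value string → Spec_get_monetary_value string (get_monetary_value string)

-- ===== LEMMAS AND PROOFS =====

theorem foldA_found (l : List Char) (ced cen : List Char) :
    l.foldl pvStepA (ced, cen, true) = (ced, cen ++ l.filter PySem.Chars.isdigit, true) := by
  induction l generalizing cen with
  | nil => simp
  | cons c rest ih =>
    by_cases hd : PySem.Chars.isdigit c = true <;>
      simp [List.foldl, pvStepA, hd, ih, List.filter]

theorem foldA_not_found (l : List Char) (ced cen : List Char) :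
    l.foldl pvStepA (ced, cen, false) =
      if ',' ∈ l then
        (ced ++ (l.takeWhile (· ≠ ',')).filter PySem.Chars.isdigit,
         cen ++ ((l.dropWhile (· ≠ ',')).tail).filter PySem.Chars.isdigit, true)
      else (ced ++ l.filter PySem.Chars.isdigit, cen, false) := by
  induction l generalizing ced with
  | nil => simp
  | cons c rest ih =>
    by_cases hc : c = ','
    · subst hc
      have hd : PySem.Chars.isdigit ',' = false := by decide
      simp [List.foldl, pvStepA, hd, foldA_found, List.takeWhile, List.dropWhile]
    · by_cases hd : PySem.Chars.isdigit c = true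
      · simp only [List.foldl, pvStepA, if_neg hc, hd, if_true, Bool.false_eq_true, if_false, ih]
        by_cases hm : ',' ∈ rest
        · simp [hm, hc, Ne.symm hc, List.takeWhile, List.dropWhile, hd]
        · simp [hm, Ne.symm hc, List.filter, hd]
      · simp only [List.foldl, pvStepA, if_neg hc, hd, Bool.false_eq_true, if_false, ih]
        by_cases hm : ',' ∈ rest
        · simp [hm, hc, Ne.symm hc, List.takeWhile, List.dropWhile, hd]
        · simp [hm, Ne.symm hc, List.filter, hd]

-- m = 0: splitOnMax.go just closes the current piece with the rest of the list
theorem go_zero (sep : List Char) (fuel : Nat) (l cur : List Char) (acc : List (List Char)) :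
    PySem.Chars.splitOnMax.go sep fuel 0 l cur acc = acc.reverse ++ [cur.reverse ++ l] := by
  cases fuel with
  | zero => simp [PySem.Chars.splitOnMax.go]
  | succ n => cases l <;> simp [PySem.Chars.splitOnMax.go]

-- m = 1, sep = ",": splits at the first comma (if any)
theorem go_one (l cur : List Char) (acc : List (List Char)) (fuel : Nat) (hf : l.length < fuel) :
    PySem.Chars.splitOnMax.go [','] fuel 1 l cur acc =
      if ',' ∈ l then
        acc.reverse ++ [cur.reverse ++ l.takeWhile (· ≠ ','), (l.dropWhile (· ≠ ',')).tail]
      else acc.reverse ++ [cur.reverse ++ l] := by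
  induction l generalizing fuel cur acc with
  | nil =>
    cases fuel with
    | zero => omega
    | succ n => simp [PySem.Chars.splitOnMax.go]
  | cons c rest ih =>
    cases fuel with
    | zero => omega
    | succ n =>
      by_cases hc : c = ','
      · subst hc
        have hpre : List.isPrefixOf [','] (',' :: rest) = true := by
          simp [List.isPrefixOf]
        simp [PySem.Chars.splitOnMax.go, hpre, go_zero, List.takeWhile, List.dropWhile]
      · have hpre : List.isPrefixOf [','] (c :: rest) = false := by
          simp [List.isPrefixOf, Ne.symm hc]
        have hn : rest.length < n := by simp at hf; omega
        simp only [PySem.Chars.splitOnMax.go, hpre, Bool.false_eq_true, if_false,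
          Nat.succ_ne_zero]
        rw [ih (c :: cur) acc n hn]
        by_cases hm : ',' ∈ rest
        · simp [hm, hc, List.takeWhile, List.dropWhile]
        · simp [hm, Ne.symm hc]

theorem splitMax_one (s : List Char) :
    PySem.Chars.splitOnMax s [','] 1 =
      if ',' ∈ s then [s.takeWhile (· ≠ ','), (s.dropWhile (· ≠ ',')).tail]
      else [s] := by
  unfold PySem.Chars.splitOnMax
  rw [if_neg (by omega : ¬ (1 : Int) < 0)]
  have : (1 : Int).toNat = 1 := rfl
  rw [this, go_one s [] [] (s.length + 1) (by omega)]
  split <;> simp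

theorem get_monetary_value_eq (string : String) :
    get_monetary_value string = get_monetary_value_alt string := by
  unfold get_monetary_value get_monetary_value_alt
  have hb : (PySem.Str.splitMax? string "," 1).getD [] =
      (PySem.Chars.splitOnMax string.toList [','] 1).map String.ofList := by
    simp [PySem.Str.splitMax?, PySem.Chars.splitMax?]
  rw [hb, splitMax_one]
  by_cases hm : ',' ∈ string.toList
  · rw [foldA_not_found string.toList ['0'] ['0'], if_pos hm, if_pos hm]
    simp [String.toList_ofList]
  · rw [foldA_not_found string.toList ['0'] ['0'], if_neg hm, if_neg hm]
    simp

-- ===== VERDICT (by name: the statement is the Claim_ definition above) =====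
theorem get_monetary_value_spec : Claim_equal_get_monetary_value := by
  intro s _
  unfold Spec_get_monetary_value
  exact get_monetary_value_eq s
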